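-- pv_equiv track=rewrite | github.com/Lopeze/bio331-utils | funks_utils.py | create_deg
-- ===== SOURCE A (Python) =====
-- def create_deg(nodes, edges, directed = False):
--     '''
--     This function creates a dictionary of node:degree pairs for input graph
--
--     Input:
--         1. nodes
--         2. edges
--         3. if graph is directed or not
--     Return:
--         A dictionary that represents node and their degrees
--         (nodes = key, degree = value)
--     '''
--
--     node_deg = {}
--     for node in nodes:
--         node_deg[node] = 0
--         for edge in edges:
--             if directed == False:
--                 if node in edge:
--                     node_deg[node] += 1
--             else:
--                 if node == edge[1]:
--                     node_deg[node] += 1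
--     return node_deg
-- ===== SOURCE B (Python) =====
-- def create_deg(nodes, edges, directed=False):
--     cnt = {}
--     for edge in edges:
--         if directed:
--             cnt[edge[1]] = cnt.get(edge[1], 0) + 1
--         else:
--             for v in set(edge):
--                 cnt[v] = cnt.get(v, 0) + 1
--     return {node: cnt.get(node, 0) for node in nodes}
-- ===== Notes on version B (the rewrite author's own statement) =====
-- stated objective: faster
-- what changed: Instead of scanning all edges once per node (nested loops), B builds an endpoint counter in one pass over the edges and then maps each node to its count.
import Mathlib
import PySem

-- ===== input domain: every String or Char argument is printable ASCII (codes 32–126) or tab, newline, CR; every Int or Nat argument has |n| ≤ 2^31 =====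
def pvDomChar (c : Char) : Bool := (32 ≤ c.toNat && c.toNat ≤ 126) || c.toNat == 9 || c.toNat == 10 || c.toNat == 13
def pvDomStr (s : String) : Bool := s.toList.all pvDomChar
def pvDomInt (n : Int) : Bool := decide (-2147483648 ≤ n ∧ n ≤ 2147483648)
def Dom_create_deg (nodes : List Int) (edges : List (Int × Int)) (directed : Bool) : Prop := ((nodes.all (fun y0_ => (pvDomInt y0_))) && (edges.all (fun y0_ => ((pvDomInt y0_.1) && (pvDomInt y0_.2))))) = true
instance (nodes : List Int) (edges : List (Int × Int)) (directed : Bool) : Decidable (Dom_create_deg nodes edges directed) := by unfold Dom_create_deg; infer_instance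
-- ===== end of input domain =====

-- B builds an endpoint counter in one pass over the edges instead of rescanning all edges per node (asymptotically faster).


-- ===== PORT A =====
def create_deg (nodes : List Int) (edges : List (Int × Int)) (directed : Bool) : List (Int × Int) :=
  (nodes.foldl (fun node_deg node =>
      edges.foldl (fun node_deg edge =>
          if directed == false then
            if node == edge.1 || node == edge.2 then
              node_deg.insert node (node_deg.getD node 0 + 1)
            else node_deg
          else
            if node == edge.2 then
              node_deg.insert node (node_deg.getD node 0 + 1)
            else node_deg)
        (node_deg.insert node 0))
    PySem.Dict.empty).items

-- ===== PORT B =====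
def create_deg_alt (nodes : List Int) (edges : List (Int × Int)) (directed : Bool) : List (Int × Int) :=
  let cnt : PySem.Dict Int Int := edges.foldl (fun cnt edge =>
      if directed then cnt.insert edge.2 (cnt.getD edge.2 0 + 1)
      else (PySem.Set.ofList [edge.1, edge.2]).foldl
             (fun cnt v => cnt.insert v (cnt.getD v 0 + 1)) cnt)
    PySem.Dict.empty
  (nodes.foldl (fun d node => d.insert node (cnt.getD node 0)) PySem.Dict.empty).items

-- ===== PRECONDITION & SPEC =====
def Spec_create_deg (nodes : List Int) (edges : List (Int × Int)) (directed : Bool) (out : List (Int × Int)) : Prop := out = create_deg_alt nodes edges directed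
instance (nodes : List Int) (edges : List (Int × Int)) (directed : Bool) (out : List (Int × Int)) : Decidable (Spec_create_deg nodes edges directed out) := by unfold Spec_create_deg; infer_instance

-- ===== CLAIM (what is proved, stated in full; the proofs are below) =====
def Claim_equal_create_deg : Prop := ∀ (nodes : List Int) (edges : List (Int × Int)) (directed : Bool), Dom_create_deg nodes edges directed → Spec_create_deg nodes edges directed (create_deg nodes edges directed)

-- ===== LEMMAS AND PROOFS =====

-- A's inner loop over the edges accumulates, into the key `n`, the number of edges satisfying the test.
theorem pvA_inner (P : Int × Int → Bool) (edges : List (Int × Int))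
    (d : PySem.Dict Int Int) (n : Int) (k : Int) :
    edges.foldl (fun d e => if P e then d.insert n (d.getD n 0 + 1) else d) (d.insert n k)
      = d.insert n (k + edges.countP P) := by
  induction edges generalizing k with
  | nil => simp
  | cons e es ih =>
    by_cases h : P e = true
    · simp only [List.foldl_cons, h, if_pos, PySem.Dict.getD_insert_self,
        PySem.Dict.insert_insert_self, ih, List.countP_cons]
      congr 1; push_cast; ring
    · simp only [List.foldl_cons, h, if_neg, Bool.false_eq_true, not_false_iff, ih,
        List.countP_cons]
      simp

-- Counting an element in the set of a pair.
theorem pvSet_pair_count (a b v : Int) :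
    ((PySem.Set.ofList [a, b] : List Int).count v : Int)
      = if (v == a || v == b) then 1 else 0 := by
  have h1 : (PySem.Set.ofList [a, b] : List Int)
      = PySem.Set.add (PySem.Set.ofList [a]) b := by
    simpa using PySem.Set.ofList_append_singleton (xs := [a]) (x := b)
  have h2 : (PySem.Set.ofList [a] : List Int) = [a] := by
    exact PySem.Set.ofList_eq_self_of_nodup [a] (List.nodup_singleton a)
  rw [h1, h2, PySem.Set.add_eq_ite]
  by_cases hba : b ∈ [a]
  · have hb : b = a := by simpa using hba
    subst hb
    by_cases hv : v = b
    · subst hv; simp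
    · simp [hv, Ne.symm hv]
  · by_cases hv1 : v = a <;> by_cases hv2 : v = b <;>
      simp_all [List.count_cons, List.count_nil] <;> omega

-- B's per-edge update of the counter adds exactly the membership indicator at each key.
theorem pvB_step (e : Int × Int) (c : PySem.Dict Int Int) (v : Int) :
    ((PySem.Set.ofList [e.1, e.2]).foldl (fun c x => c.insert x (c.getD x 0 + 1)) c).getD v 0
      = c.getD v 0 + (if (v == e.1 || v == e.2) then 1 else 0) := by
  rw [PySem.Dict.getD_foldl_insert_add_one, pvSet_pair_count]

-- B's undirected counter counts, at each key, the edges containing that key.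
theorem pvB_counterU (edges : List (Int × Int)) (c : PySem.Dict Int Int) (v : Int) :
    (edges.foldl (fun c e =>
        (PySem.Set.ofList [e.1, e.2]).foldl (fun c x => c.insert x (c.getD x 0 + 1)) c) c).getD v 0
      = c.getD v 0 + edges.countP (fun e => v == e.1 || v == e.2) := by
  induction edges generalizing c with
  | nil => simp
  | cons e es ih =>
    simp only [List.foldl_cons, ih, pvB_step, List.countP_cons]
    by_cases h : (v == e.1 || v == e.2) = true <;> simp [h] <;> ring

-- B's directed counter counts, at each key, the edges with that head.
theorem pvB_counterD (edges : List (Int × Int)) (c : PySem.Dict Int Int) (v : Int) :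
    (edges.foldl (fun c e => c.insert e.2 (c.getD e.2 0 + 1)) c).getD v 0
      = c.getD v 0 + edges.countP (fun e => v == e.2) := by
  induction edges generalizing c with
  | nil => simp
  | cons e es ih =>
    simp only [List.foldl_cons, ih, List.countP_cons]
    by_cases h : v = e.2
    · subst h; simp [PySem.Dict.getD_insert_self]; ring
    · rw [PySem.Dict.getD_insert]; simp [h]

-- Two insert-loops over the same node list with pointwise equal values build equal dicts.
theorem pvFold_congr (f g : Int → Int) (h : ∀ n, f n = g n) (nodes : List Int)
    (d : PySem.Dict Int Int) :
    nodes.foldl (fun d n => d.insert n (f n)) d = nodes.foldl (fun d n => d.insert n (g n)) d := by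
  induction nodes generalizing d with
  | nil => rfl
  | cons n ns ih => simp only [List.foldl_cons, h n, ih]

-- ===== VERDICT (by name: the statement is the Claim_ definition above) =====
theorem create_deg_spec : Claim_equal_create_deg := by
  intro nodes edges directed _
  unfold Spec_create_deg create_deg create_deg_alt
  cases directed with
  | false =>
    congr 1
    have hA : ∀ (d : PySem.Dict Int Int) (n : Int),
        edges.foldl (fun d e => if (false : Bool) == false then
            (if n == e.1 || n == e.2 then d.insert n (d.getD n 0 + 1) else d)
          else (if n == e.2 then d.insert n (d.getD n 0 + 1) else d)) (d.insert n 0)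
        = d.insert n ((0 : Int) + edges.countP (fun e => n == e.1 || n == e.2)) := by
      intro d n
      simpa using pvA_inner (fun e => n == e.1 || n == e.2) edges d n 0
    simp only [hA]
    exact pvFold_congr _ _ (fun n => by
      simp only [Bool.false_eq_true, if_false]
      rw [pvB_counterU]; simp) nodes _
  | true =>
    congr 1
    have hA : ∀ (d : PySem.Dict Int Int) (n : Int),
        edges.foldl (fun d e => if (true : Bool) == false then
            (if n == e.1 || n == e.2 then d.insert n (d.getD n 0 + 1) else d)
          else (if n == e.2 then d.insert n (d.getD n 0 + 1) else d)) (d.insert n 0)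
        = d.insert n ((0 : Int) + edges.countP (fun e => n == e.2)) := by
      intro d n
      simpa using pvA_inner (fun e => n == e.2) edges d n 0
    simp only [hA]
    exact pvFold_congr _ _ (fun n => by
      simp only [if_true]
      rw [pvB_counterD]; simp) nodes _
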